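-- pv_equiv track=rewrite | github.com/jakubwiedemann/rnaloops | Commons/SecondaryStructureTools.py | find_minimal
-- ===== SOURCE A (Python) =====
-- def find_minimal(fragments):
--     min_val = fragments[0][0]
--     k = 0
--     for x, el in enumerate(fragments):
--         if el[0] < min_val:
--             min_val = el[0]
--             k = x
--
--     for i in range(0, k):
--         fragments.append(fragments.pop(0))
--     return fragments
-- ===== SOURCE B (Python) =====
-- def find_minimal(fragments):
--     heads = [f[0] for f in fragments]
--     k = heads.index(min(heads))
--     return fragments[k:] + fragments[:k]
-- ===== Notes on version B (the rewrite author's own statement) =====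
-- stated objective: simpler
-- what changed: Instead of rotating the list one element at a time with k pop(0)/append passes, B finds the index of the first minimal head with heads.index(min(heads)) and returns the rotation as a single slice concatenation fragments[k:]+fragments[:k]; B returns a new list instead of mutating the argument in place.
import Mathlib
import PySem

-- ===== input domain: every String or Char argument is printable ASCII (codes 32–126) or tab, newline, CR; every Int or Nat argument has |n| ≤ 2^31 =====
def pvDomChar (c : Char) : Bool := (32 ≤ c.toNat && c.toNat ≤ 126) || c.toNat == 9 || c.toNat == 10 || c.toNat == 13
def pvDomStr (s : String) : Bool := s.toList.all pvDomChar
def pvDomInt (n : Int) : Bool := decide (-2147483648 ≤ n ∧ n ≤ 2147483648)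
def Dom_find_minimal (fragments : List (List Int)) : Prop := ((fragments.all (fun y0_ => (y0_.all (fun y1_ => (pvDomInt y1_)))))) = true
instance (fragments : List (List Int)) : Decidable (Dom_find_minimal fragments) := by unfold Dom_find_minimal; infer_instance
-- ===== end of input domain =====

-- B rotates via heads.index(min(heads)) and one slice concatenation instead of A's k pop(0)/append single-step
-- rotations; A mutates its argument in place and returns it, B returns a fresh list — equivalence is about the return value only.

-- ===== PORT A =====
-- one pass of `fragments.append(fragments.pop(0))`
def pvRot1 (xs : List (List Int)) : List (List Int) :=
  match xs with
  | [] => []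
  | h :: t => t ++ [h]

-- `for i in range(0, k): fragments.append(fragments.pop(0))`
def pvRotA : Nat → List (List Int) → List (List Int)
  | 0, xs => xs
  | n + 1, xs => pvRotA n (pvRot1 xs)

-- `for x, el in enumerate(fragments): if el[0] < min_val: …` carrying the state (min_val, k)
def pvLoopA : List (List Int) → Nat → Int × Nat → Int × Nat
  | [], _, st => st
  | el :: rest, x, st =>
      match PySem.List.pyGet? el 0 with
      | none => pvLoopA rest (x + 1) st      -- el[0] raises (outside Pre_)
      | some h => pvLoopA rest (x + 1) (if h < st.1 then (h, x) else st)

def find_minimal (fragments : List (List Int)) : List (List Int) :=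
  match PySem.List.pyGet? fragments 0 with
  | none => []                               -- fragments[0] raises (outside Pre_)
  | some f0 =>
    match PySem.List.pyGet? f0 0 with
    | none => []                             -- fragments[0][0] raises (outside Pre_)
    | some m0 => pvRotA (pvLoopA fragments 0 (m0, 0)).2 fragments

-- ===== PORT B =====
-- f[0] as B's comprehension reads it (the default is never used inside Pre_)
def pvHd (f : List Int) : Int := (PySem.List.pyGet? f 0).getD 0

def find_minimal_alt (fragments : List (List Int)) : List (List Int) :=
  let heads := fragments.map pvHd                                        -- [f[0] for f in fragments]
  match PySem.List.min? heads (fun y => y) with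
  | none => fragments                                                    -- min([]) raises (outside Pre_)
  | some m =>
    let k := (PySem.List.index? heads m).getD 0                          -- heads.index(min(heads))
    PySem.List.slice fragments (some (k : Int)) none ++ PySem.List.slice fragments none (some (k : Int))

-- ===== PRECONDITION & SPEC =====
-- A raises IndexError exactly when fragments is empty (fragments[0]) or some fragment is empty (el[0]).
def Pre_find_minimal (fragments : List (List Int)) : Prop :=
  fragments ≠ [] ∧ ∀ f ∈ fragments, f ≠ []
instance (fragments : List (List Int)) : Decidable (Pre_find_minimal fragments) := by
  unfold Pre_find_minimal; infer_instance

def pvWitness_find_minimal : List (List Int) := [[3, 9], [1], [2], [1, 5]]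

def Spec_find_minimal (fragments : List (List Int)) (out : List (List Int)) : Prop := out = find_minimal_alt fragments
instance (fragments : List (List Int)) (out : List (List Int)) : Decidable (Spec_find_minimal fragments out) := by unfold Spec_find_minimal; infer_instance

-- ===== CLAIM (what is proved, stated in full; the proofs are below) =====
def Claim_equal_find_minimal : Prop := ∀ (fragments : List (List Int)), Dom_find_minimal fragments → Pre_find_minimal fragments → Spec_find_minimal fragments (find_minimal fragments)

-- ===== LEMMAS AND PROOFS =====

lemma pvHd_cons (a : Int) (t : List Int) : pvHd (a :: t) = a := by
  simp [pvHd, PySem.List.pyGet?, PySem.List.pyIdx?]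

-- A's scan, characterised through B's min?/index? on the list of heads
lemma pvLoopA_spec (l : List (List Int)) :
    ∀ (i : Nat) (mv : Int) (k : Nat), (∀ f ∈ l, f ≠ []) →
    pvLoopA l i (mv, k) =
      match PySem.List.min? (l.map pvHd) (fun y => y) with
      | none => (mv, k)
      | some m =>
          if m < mv then (m, i + (PySem.List.index? (l.map pvHd) m).getD 0) else (mv, k) := by
  induction l with
  | nil => intro i mv k _; simp [pvLoopA, PySem.List.min?]
  | cons f rest ih =>
    intro i mv k hne
    have hf : f ≠ [] := hne f (by simp)
    obtain ⟨a, t, rfl⟩ : ∃ a t, f = a :: t := by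
      cases f with
      | nil => simp at hf
      | cons a t => exact ⟨a, t, rfl⟩
    have hrest : ∀ g ∈ rest, g ≠ [] := fun g hg => hne g (by simp [hg])
    have hmap : ((a :: t) :: rest).map pvHd = a :: rest.map pvHd := by
      simp [pvHd_cons]
    rw [hmap, PySem.List.min?_id_cons]
    have hstep : pvLoopA ((a :: t) :: rest) i (mv, k)
        = pvLoopA rest (i + 1) (if a < mv then (a, i) else (mv, k)) := by
      simp [pvLoopA]
    cases hm : PySem.List.min? (rest.map pvHd) (fun y => y) with
    | none =>
      have hrn : rest.map pvHd = [] := (PySem.List.min?_eq_none_iff _ _).mp hm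
      have hrn' : rest = [] := by simpa using hrn
      subst hrn'
      rw [hstep]
      simp only [List.map_nil, List.foldl_nil, pvLoopA]
      split_ifs with h1
      · simp
      · rfl
    | some m' =>
      have hfold : (rest.map pvHd).foldl min a = min a m' := by
        obtain ⟨b, t', hbt⟩ : ∃ b t', rest.map pvHd = b :: t' := by
          cases hh : rest.map pvHd with
          | nil => rw [hh] at hm; simp [PySem.List.min?] at hm
          | cons b t' => exact ⟨b, t', rfl⟩
        rw [hbt] at hm ⊢
        rw [PySem.List.min?_id_cons] at hm
        have : m' = t'.foldl min b := by injection hm with h; omega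
        subst this
        rw [List.foldl_cons]
        exact List.foldl_assoc
      have hmem : m' ∈ rest.map pvHd := PySem.List.min?_mem hm
      obtain ⟨j, hj⟩ : ∃ j, PySem.List.index? (rest.map pvHd) m' = some j := by
        have := (PySem.List.index?_isSome_iff (rest.map pvHd) m').mpr hmem
        exact Option.isSome_iff_exists.mp this
      rw [hstep, hfold]
      split_ifs with h1
      · -- a < mv
        rw [ih (i + 1) a i hrest, hm]
        dsimp only
        by_cases h2 : m' < a
        · have hne' : a ≠ m' := by omega
          rw [if_pos h2, min_eq_right (le_of_lt h2),
              if_pos (lt_trans h2 h1),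
              PySem.List.index?_cons_of_ne _ hne', hj]
          simp; omega
        · rw [if_neg h2, min_eq_left (by omega),
              if_pos h1, PySem.List.index?_cons_self]
          simp
      · -- ¬ a < mv
        rw [ih (i + 1) mv k hrest, hm]
        dsimp only
        by_cases h2 : m' < mv
        · have hne' : a ≠ m' := by omega
          rw [if_pos h2, min_eq_right (by omega),
              if_pos h2, PySem.List.index?_cons_of_ne _ hne', hj]
          simp; omega
        · rw [if_neg h2, if_neg (by simp only [min_lt_iff]; omega)]

-- k single-step pop(0)/append rotations are one slice rotation
lemma pvRotA_eq (k : Nat) : ∀ (xs : List (List Int)), k ≤ xs.length →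
    pvRotA k xs = xs.drop k ++ xs.take k := by
  induction k with
  | zero => intro xs _; simp [pvRotA]
  | succ n ih =>
    intro xs hk
    match xs with
    | [] => simp at hk
    | h :: t =>
      simp at hk
      have := ih (t ++ [h]) (by simp; omega)
      simp [pvRotA, pvRot1, this]
      rw [List.drop_append_of_le_length (by omega), List.take_append_of_le_length (by omega)]
      simp

-- ===== VERDICT (by name: the statement is the Claim_ definition above) =====
theorem find_minimal_spec : Claim_equal_find_minimal := by
  intro fragments _ hpre
  obtain ⟨hne0, hall⟩ := hpre
  obtain ⟨f0, rest, rfl⟩ : ∃ f0 rest, fragments = f0 :: rest := by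
    cases fragments with
    | nil => simp at hne0
    | cons f0 rest => exact ⟨f0, rest, rfl⟩
  obtain ⟨a, t, rfl⟩ : ∃ a t, f0 = a :: t := by
    cases f0 with
    | nil => exact absurd rfl (hall [] (by simp))
    | cons a t => exact ⟨a, t, rfl⟩
  show find_minimal _ = find_minimal_alt _
  have hmap : ((a :: t) :: rest).map pvHd = a :: rest.map pvHd := by simp [pvHd_cons]
  -- reduce A to the rotation of the characterised loop
  have hA : find_minimal ((a :: t) :: rest)
      = pvRotA (pvLoopA ((a :: t) :: rest) 0 (a, 0)).2 ((a :: t) :: rest) := by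
    simp [find_minimal]
  rw [hA, pvLoopA_spec _ 0 a 0 hall, hmap, PySem.List.min?_id_cons]
  -- B's min and its first index
  set m : Int := (rest.map pvHd).foldl min a with hmdef
  have hmin : PySem.List.min? (a :: rest.map pvHd) (fun y => y) = some m :=
    PySem.List.min?_id_cons a (rest.map pvHd)
  have hle : m ≤ a := (PySem.List.min?_isMin hmin) a (by simp)
  obtain ⟨K, hK⟩ : ∃ K, PySem.List.index? (a :: rest.map pvHd) m = some K := by
    have hmem : m ∈ a :: rest.map pvHd := PySem.List.min?_mem hmin
    exact Option.isSome_iff_exists.mp ((PySem.List.index?_isSome_iff _ _).mpr hmem)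
  have hKlt : K < ((a :: t) :: rest).length := by
    obtain ⟨hk, -, -⟩ := PySem.List.getElem_of_index?_eq_some hK
    simpa using hk
  have hB : find_minimal_alt ((a :: t) :: rest)
      = ((a :: t) :: rest).drop K ++ ((a :: t) :: rest).take K := by
    show (match PySem.List.min? (((a :: t) :: rest).map pvHd) (fun y => y) with
      | none => ((a :: t) :: rest)
      | some m =>
        PySem.List.slice ((a :: t) :: rest) (some (((PySem.List.index? (((a :: t) :: rest).map pvHd) m).getD 0 : Nat) : Int)) none
          ++ PySem.List.slice ((a :: t) :: rest) none (some (((PySem.List.index? (((a :: t) :: rest).map pvHd) m).getD 0 : Nat) : Int)))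
      = _
    rw [hmap, hmin]
    dsimp only
    rw [hK]
    simp [PySem.List.slice_from_natCast, PySem.List.slice_to_natCast]
  rw [hB]
  dsimp only
  by_cases hma : m < a
  · rw [if_pos hma, hK]
    simp only [Option.getD_some, Nat.zero_add]
    exact pvRotA_eq K _ (le_of_lt hKlt)
  · have hma' : m = a := le_antisymm hle (by omega)
    rw [if_neg hma]
    have hK0 : K = 0 := by
      rw [hma', PySem.List.index?_cons_self] at hK
      injection hK with h; omega
    subst hK0
    simp [pvRotA]
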